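-- pv_equiv track=rewrite | github.com/kj9470/Algorithm | 프로그래머스/1/160586. 대충 만든 자판/대충 만든 자판.py | solution
-- ===== SOURCE A (Python) =====
-- def solution(keymap, targets):
--     answer = []
--     dic = {}
--     key = "".join(targets)
--     key = list(set(key))
--     dic = dict.fromkeys(key, 999)
--
--     for map in keymap:
--         for i in range(len(map)):
--             m = map[i]
--             if (m in dic and dic[m] > i + 1):
--                 dic[m] = i + 1
--
--     for tar in targets:
--         tmp = 0
--         for t in tar:
--             v = dic[t]
--             if v == 999:
--                 tmp = -1
--                 break
--             tmp += int(dic[t])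
--         answer.append(tmp)
--     return answer
-- ===== SOURCE B (Python) =====
-- def solution(keymap, targets):
--     def presses(tar):
--         total = 0
--         for t in tar:
--             best = min((s.index(t) + 1 for s in keymap if t in s), default=None)
--             if best is None:
--                 return -1
--             total += best
--         return total
--     return [presses(tar) for tar in targets]
-- ===== Notes on version B (the rewrite author's own statement) =====
-- stated objective: simpler
-- what changed: Dropped A's precomputed min-press dictionary (built from set(''.join(targets)) with a 999 sentinel); B computes each character's cost directly with min(s.index(t)+1 for s in keymap if t in s) and returns -1 for a word as soon as a character is untypable. Pre_ excludes only inputs where a target word is fully typable but some character first occurs at position >= 998 in every keymap string containing it (A's 999 sentinel then reports -1, B the true count); such inputs need a keymap string of 999+ characters.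
import Mathlib
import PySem

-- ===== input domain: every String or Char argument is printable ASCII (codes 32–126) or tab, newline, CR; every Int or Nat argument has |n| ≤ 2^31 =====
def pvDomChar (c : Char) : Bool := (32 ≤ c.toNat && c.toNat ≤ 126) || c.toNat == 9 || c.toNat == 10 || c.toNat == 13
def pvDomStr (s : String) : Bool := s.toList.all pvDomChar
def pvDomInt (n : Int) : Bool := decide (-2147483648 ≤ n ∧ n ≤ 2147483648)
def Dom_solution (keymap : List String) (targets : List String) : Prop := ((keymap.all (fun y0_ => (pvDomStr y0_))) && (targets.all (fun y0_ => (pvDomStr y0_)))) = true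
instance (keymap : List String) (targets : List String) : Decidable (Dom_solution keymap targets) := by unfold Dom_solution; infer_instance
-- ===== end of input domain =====

-- B drops A's precomputed min-press dictionary and computes each character's cost by a direct
-- scan of the keymaps (objective: simpler; same return value on Pre_).

-- ===== PORT A =====
-- inner loop: 'for i in range(len(map)): m = map[i]; if m in dic and dic[m] > i + 1: dic[m] = i + 1'
-- (i is always in range, so the total pyGetD is exact for map[i])
def solutionInner (dic : PySem.Dict Char Int) (s : List Char) : PySem.Dict Char Int :=
  (PySem.List.pyRange 0 (PySem.List.len s) 1).foldl
    (fun d i =>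
      let m := PySem.List.pyGetD s i ' '
      if d.contains m && decide (d.getD m 0 > i + 1) then d.insert m (i + 1) else d) dic

-- 'for t in tar: v = dic[t]; if v == 999: tmp = -1; break; tmp += int(dic[t])'
-- (every char of a target is a key of dic by construction, so dic[t] never raises and
--  getD's default is never used; int() is the identity on a Python int)
def solutionWord (dic : PySem.Dict Char Int) (chars : List Char) (tmp : Int) : Int :=
  match chars with
  | [] => tmp
  | t :: rest =>
    let v := dic.getD t 0
    if v = 999 then -1 else solutionWord dic rest (tmp + v)

def solution (keymap : List String) (targets : List String) : List Int :=
  -- key = list(set("".join(targets))): ''.join concatenates, so its char list is the flatten;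
  -- the resulting dict is only ever looked up, never iterated, so set order is immaterial
  let key : PySem.Set Char := PySem.Set.ofList ((targets.map String.toList).flatten)
  -- dic = dict.fromkeys(key, 999)
  let dic : PySem.Dict Char Int := PySem.Dict.ofList (key.map (fun c => (c, (999 : Int))))
  let dic := keymap.foldl (fun d s => solutionInner d s.toList) dic
  targets.foldl (fun answer tar => answer ++ [solutionWord dic tar.toList 0]) []

-- ===== PORT B =====
-- best = min((s.index(t) + 1 for s in keymap if t in s), default=None)
def altBest (keymap : List String) (c : Char) : Option Int :=
  PySem.List.min?
    (keymap.filterMap (fun s => (PySem.List.index? s.toList c).map (fun i => (Int.ofNat i + 1))))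
    (fun x => x)

-- 'def presses(tar): total = 0; for t in tar: … return -1 … total += best; return total'
def altWord (keymap : List String) (chars : List Char) (total : Int) : Int :=
  match chars with
  | [] => total
  | t :: rest =>
    match altBest keymap t with
    | none => -1
    | some best => altWord keymap rest (total + best)

def solution_alt (keymap : List String) (targets : List String) : List Int :=
  targets.map (fun tar => altWord keymap tar.toList 0)

-- ===== PRECONDITION & SPEC =====
-- Pre_ excludes only the inputs (outside the problem's stated constraints, which cap keymap
-- strings at 100 characters) where some target word's characters all occur in the keymaps but
-- one of them first occurs at position ≥ 998 in every keymap string containing it: there A's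
-- 999 sentinel reports the word as untypable (-1) while B's direct scan returns the minimal
-- press count — an unspecified corner on which either value is defensible.
def Pre_solution (keymap : List String) (targets : List String) : Prop :=
  (targets.all (fun tar =>
     (tar.toList.any (fun c => keymap.all (fun s => !(s.toList.contains c)))) ||
     (tar.toList.all (fun c =>
        keymap.all (fun s => !(s.toList.contains c)) ||
        keymap.any (fun s => (s.toList.take 998).contains c))))) = true
instance (keymap : List String) (targets : List String) : Decidable (Pre_solution keymap targets) := by
  unfold Pre_solution; infer_instance

def pvWitness_solution : List String × List String := (["abc", "xy"], ["cab", "dx", ""])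

def Spec_solution (keymap : List String) (targets : List String) (out : List Int) : Prop :=
  out = solution_alt keymap targets
instance (keymap : List String) (targets : List String) (out : List Int) : Decidable (Spec_solution keymap targets out) := by
  unfold Spec_solution; infer_instance

-- ===== CLAIM (what is proved, stated in full; the proofs are below) =====
def Claim_equal_solution : Prop := ∀ (keymap : List String) (targets : List String), Dom_solution keymap targets → Pre_solution keymap targets → Spec_solution keymap targets (solution keymap targets)

-- ===== LEMMAS AND PROOFS =====

-- Pre_ restated in quantifier form for the proofs
theorem Pre_iff (keymap targets : List String) : Pre_solution keymap targets ↔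
    ∀ tar ∈ targets,
      (∃ c ∈ tar.toList, ∀ s ∈ keymap, c ∉ s.toList) ∨
      (∀ c ∈ tar.toList, (∀ s ∈ keymap, c ∉ s.toList) ∨ (∃ s ∈ keymap, c ∈ s.toList.take 998)) := by
  unfold Pre_solution
  simp [List.all_eq_true, List.any_eq_true]

-- A's value for one character, as a function of B's helper: 999 if the character is in no
-- keymap, otherwise the true minimum clipped at A's sentinel
def avOf (keymap : List String) (c : Char) : Int :=
  match altBest keymap c with
  | none => 999
  | some b => min 999 b

-- the initial dict dict.fromkeys(key, 999) answers 999 exactly on the collected keys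
theorem get?_fromkeys (c : Char) : ∀ (l : List Char) (d : PySem.Dict Char Int),
    ((l.map (fun c => (c, (999 : Int)))).foldl (fun acc p => acc.insert p.1 p.2) d).get? c
      = if c ∈ l then some 999 else d.get? c := by
  intro l
  induction l with
  | nil => intro d; simp
  | cons x xs ih =>
    intro d
    simp only [List.map_cons, List.foldl_cons, ih (d.insert x 999)]
    rw [PySem.Dict.get?_insert]
    by_cases hx : c = x <;> by_cases hm : c ∈ xs <;> simp [hx, hm]

-- A's inner loop over one keymap string, rephrased over enumerate
theorem inner_eq_enumerate (d : PySem.Dict Char Int) (s : List Char) :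
    solutionInner d s =
      (PySem.List.enumerate s 0).foldl
        (fun d p => if d.contains p.2 && decide (d.getD p.2 0 > p.1 + 1) then d.insert p.2 (p.1 + 1) else d) d := by
  unfold solutionInner
  rw [PySem.List.enumerate_eq_map_pyRange s ' ', List.foldl_map]

-- after one keymap string, an entry holds the min of its old value and (first index + 1)
theorem inner_get? (c : Char) : ∀ (s : List Char) (a : Int) (d : PySem.Dict Char Int),
    (((PySem.List.enumerate s a).foldl
        (fun d p => if d.contains p.2 && decide (d.getD p.2 0 > p.1 + 1) then d.insert p.2 (p.1 + 1) else d) d).get? c)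
      = match d.get? c, PySem.List.index? s c with
        | some v, some k => some (min v (a + (k : Int) + 1))
        | some v, none => some v
        | none, _ => none := by
  intro s
  induction s with
  | nil =>
    intro a d
    simp only [PySem.List.enumerate_nil, List.foldl_nil]
    cases hd : d.get? c <;> simp [PySem.List.index?, List.idxOf?]
  | cons x xs ih =>
    intro a d
    rw [PySem.List.enumerate_cons, List.foldl_cons]
    rcases eq_or_ne x c with rfl | hxc
    · rw [PySem.List.index?_cons_self]
      cases hd : d.get? x with
      | none =>
        have hcont : d.contains x = false := by
          rw [PySem.Dict.contains_eq_isSome_get?, hd]; rfl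
        rw [if_neg (by simp [hcont]), ih (a + 1) d, hd]
      | some v =>
        have hcont : d.contains x = true := by
          rw [PySem.Dict.contains_eq_isSome_get?, hd]; rfl
        have hgd : d.getD x 0 = v := by rw [PySem.Dict.getD_eq_get?_getD, hd]; rfl
        by_cases hv : v > a + 1
        · rw [if_pos (by simp [hcont, hgd]; omega), ih (a + 1) (d.insert x (a + 1)),
            PySem.Dict.get?_insert]
          rw [if_pos rfl]
          cases hi : PySem.List.index? xs x <;> dsimp only <;> congr 1 <;> omega
        · rw [if_neg (by simp [hcont, hgd]; omega), ih (a + 1) d, hd]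
          cases hi : PySem.List.index? xs x <;> dsimp only <;> congr 1 <;> omega
    · rw [PySem.List.index?_cons_of_ne xs hxc]
      set d' := if d.contains x && decide (d.getD x 0 > a + 1) then d.insert x (a + 1) else d with hd'
      have hget : d'.get? c = d.get? c := by
        rw [hd']
        split
        · rw [PySem.Dict.get?_insert]; exact if_neg (fun h => hxc h.symm)
        · rfl
      rw [ih (a + 1) d', hget]
      cases hd : d.get? c <;> cases hi : PySem.List.index? xs c <;>
        simp only [Option.map_none, Option.map_some] <;>
        first
        | rfl
        | (congr 1; omega)

-- B's minimum over 's :: km' in terms of the head string and the tail minimum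
theorem altBest_cons (s : String) (km : List String) (c : Char) :
    altBest (s :: km) c =
      match PySem.List.index? s.toList c, altBest km c with
      | none, r => r
      | some k, none => some (Int.ofNat k + 1)
      | some k, some b => some (min (Int.ofNat k + 1) b) := by
  unfold altBest
  rw [List.filterMap_cons]
  cases hi : PySem.List.index? s.toList c with
  | none => simp
  | some k =>
    simp only [Option.map_some]
    cases hrest : km.filterMap (fun s => (PySem.List.index? s.toList c).map (fun i => (Int.ofNat i + 1))) with
    | nil =>
      rw [PySem.List.min?_eq_none_iff _ (fun x => x) |>.mpr rfl]
      rw [PySem.List.min?_id_cons]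
      simp
    | cons y t =>
      rw [PySem.List.min?_id_cons, PySem.List.min?_id_cons]
      show some (List.foldl min (Int.ofNat k + 1) (y :: t)) = _
      rw [List.foldl_cons, List.foldl_assoc (op := min)]

-- after A's whole keymap loop, an entry holds the min of its initial 999 and B's minimum
theorem outer_get? (c : Char) : ∀ (km : List String) (d : PySem.Dict Char Int),
    ((km.foldl (fun d s => solutionInner d s.toList) d).get? c)
      = match d.get? c, altBest km c with
        | some v, some b => some (min v b)
        | some v, none => some v
        | none, _ => none := by
  intro km
  induction km with
  | nil =>
    intro d
    simp only [List.foldl_nil]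
    cases hd : d.get? c <;> rfl
  | cons s km ih =>
    intro d
    rw [List.foldl_cons, ih (solutionInner d s.toList), inner_eq_enumerate d s.toList,
      inner_get? c s.toList 0 d, altBest_cons]
    cases hd : d.get? c <;> cases hi : PySem.List.index? s.toList c <;>
      cases hb : altBest km c <;>
      simp only [] <;>
      first
      | rfl
      | (congr 1; simp only [Int.ofNat_eq_natCast]; omega)

theorem altBest_eq_none_iff (km : List String) (c : Char) :
    altBest km c = none ↔ ∀ s ∈ km, c ∉ s.toList := by
  unfold altBest
  rw [PySem.List.min?_eq_none_iff, List.filterMap_eq_nil_iff]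
  constructor
  · intro h s hs
    have := h s hs
    simp only [Option.map_eq_none_iff] at this
    rw [PySem.List.index?_eq_none_iff] at this
    exact this
  · intro h s hs
    simp only [Option.map_eq_none_iff]
    rw [PySem.List.index?_eq_none_iff]
    exact h s hs

-- an occurrence among the first n characters bounds the first occurrence
theorem index?_lt_of_mem_take (s : List Char) (c : Char) (n : Nat) (h : c ∈ s.take n) :
    ∃ k, PySem.List.index? s c = some k ∧ k < n := by
  have hmem : c ∈ s := List.mem_of_mem_take h
  have hsome : (PySem.List.index? s c).isSome := (PySem.List.index?_isSome_iff s c).mpr hmem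
  obtain ⟨k, hk⟩ := Option.isSome_iff_exists.mp hsome
  refine ⟨k, hk, ?_⟩
  by_contra hge
  push Not at hge
  obtain ⟨pre, suf, hdecomp, hlen, hnot⟩ := (PySem.List.index?_eq_some_iff s c k).mp hk
  have : c ∈ pre := by
    have : s.take n = pre.take n := by
      rw [hdecomp, List.take_append_of_le_length (by omega)]
    rw [this] at h
    exact List.mem_of_mem_take h
  exact hnot this

theorem altBest_shallow (km : List String) (c : Char)
    (h : ∃ s ∈ km, c ∈ s.toList.take 998) :
    ∃ b, altBest km c = some b ∧ b ≤ 998 := by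
  obtain ⟨s, hs, hc⟩ := h
  obtain ⟨k, hk, hklt⟩ := index?_lt_of_mem_take s.toList c 998 hc
  have hcand : (Int.ofNat k + 1) ∈ km.filterMap (fun s => (PySem.List.index? s.toList c).map (fun i => (Int.ofNat i + 1))) := by
    exact List.mem_filterMap.mpr ⟨s, hs, by rw [hk]; rfl⟩
  have hne : km.filterMap (fun s => (PySem.List.index? s.toList c).map (fun i => (Int.ofNat i + 1))) ≠ [] := by
    intro hnil; rw [hnil] at hcand; exact List.not_mem_nil hcand
  cases hb : altBest km c with
  | none => exact absurd ((PySem.List.min?_eq_none_iff _ _).mp hb) hne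
  | some b =>
    refine ⟨b, rfl, ?_⟩
    have := PySem.List.min?_isMin hb (Int.ofNat k + 1) hcand
    simp only [Int.ofNat_eq_natCast] at this
    omega

-- a word containing a character absent from every keymap makes B return -1
theorem altWord_neg (km : List String) : ∀ (chars : List Char) (total : Int),
    (∃ c ∈ chars, altBest km c = none) → altWord km chars total = -1 := by
  intro chars
  induction chars with
  | nil => intro total h; obtain ⟨c, hc, _⟩ := h; exact absurd hc (List.not_mem_nil)
  | cons t rest ih =>
    intro total h
    unfold altWord
    cases hb : altBest km t with
    | none => rfl
    | some b =>
      apply ih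
      obtain ⟨c, hc, hnone⟩ := h
      rcases List.mem_cons.mp hc with rfl | hmem
      · rw [hb] at hnone; cases hnone
      · exact ⟨c, hmem, hnone⟩

-- the per-word loops agree whenever every character is shallow-or-missing, or some
-- character is missing from every keymap
theorem word_eq (km : List String) (dic : PySem.Dict Char Int) :
    ∀ (chars : List Char) (tmp : Int),
      (∀ c ∈ chars, dic.get? c = some (avOf km c)) →
      ((∃ c ∈ chars, altBest km c = none) ∨
        (∀ c ∈ chars, (altBest km c = none) ∨ ∃ b, altBest km c = some b ∧ b ≤ 998)) →
      solutionWord dic chars tmp = altWord km chars tmp := by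
  intro chars
  induction chars with
  | nil => intro tmp _ _; rfl
  | cons t rest ih =>
    intro tmp hav hcase
    have hv : dic.getD t 0 = avOf km t := by
      rw [PySem.Dict.getD_eq_get?_getD, hav t (List.mem_cons_self)]; rfl
    unfold solutionWord altWord
    simp only [hv]
    cases hb : altBest km t with
    | none =>
      rw [if_pos (by unfold avOf; rw [hb])]
    | some b =>
      by_cases hble : b ≤ 998
      · have havt : avOf km t = b := by unfold avOf; rw [hb]; dsimp only; omega
        rw [havt, if_neg (by omega)]
        apply ih (tmp + b) (fun c hc => hav c (List.mem_cons_of_mem _ hc))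
        rcases hcase with h | h
        · obtain ⟨c, hc, hnone⟩ := h
          rcases List.mem_cons.mp hc with rfl | hmem
          · rw [hb] at hnone; cases hnone
          · exact Or.inl ⟨c, hmem, hnone⟩
        · exact Or.inr (fun c hc => h c (List.mem_cons_of_mem _ hc))
      · -- deep character: A sees the 999 sentinel and breaks; under Pre_ the word then also
        -- contains a character missing from every keymap, so B returns -1 as well
        have havt : avOf km t = 999 := by unfold avOf; rw [hb]; dsimp only; omega
        rw [havt, if_pos rfl]
        rcases hcase with h | h
        · obtain ⟨c, hc, hnone⟩ := h
          rcases List.mem_cons.mp hc with rfl | hmem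
          · rw [hb] at hnone; cases hnone
          · exact (altWord_neg km rest (tmp + b) ⟨c, hmem, hnone⟩).symm
        · rcases h t (List.mem_cons_self) with h1 | ⟨b', hb', hble'⟩
          · rw [hb] at h1; cases h1
          · rw [hb] at hb'; injection hb' with hbb; omega

-- ===== VERDICT (by name: the statement is the Claim_ definition above) =====
theorem solution_spec : Claim_equal_solution := by
  intro keymap targets _hdom hpre
  unfold Spec_solution solution solution_alt
  rw [PySem.List.foldl_append_singleton_eq_map (fun tar => solutionWord
    (keymap.foldl (fun d s => solutionInner d s.toList)
      (PySem.Dict.ofList ((PySem.Set.ofList ((targets.map String.toList).flatten)).map (fun c => (c, (999 : Int)))))) tar.toList 0) targets []]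
  rw [List.nil_append]
  apply List.map_congr_left
  intro tar htar
  set allc := (targets.map String.toList).flatten with hallc
  set dic := keymap.foldl (fun d s => solutionInner d s.toList)
      (PySem.Dict.ofList ((PySem.Set.ofList allc).map (fun c => (c, (999 : Int))))) with hdic
  have hchar : ∀ c ∈ tar.toList, dic.get? c = some (avOf keymap c) := by
    intro c hc
    have hmem : c ∈ allc := by
      rw [hallc]; exact List.mem_flatten.mpr ⟨tar.toList, List.mem_map_of_mem htar, hc⟩
    have h0 : (PySem.Dict.ofList ((PySem.Set.ofList allc).map (fun c => (c, (999 : Int))))).get? c = some 999 := by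
      show ((((PySem.Set.ofList allc).map (fun c => (c, (999 : Int)))).foldl
          (fun acc p => acc.insert p.1 p.2) PySem.Dict.empty).get? c) = some 999
      rw [get?_fromkeys]
      simp [PySem.Set.mem_ofList, hmem]
    rw [hdic, outer_get? c keymap _, h0]
    unfold avOf
    cases hb : altBest keymap c <;> simp [min_comm]
  have hcase := (Pre_iff keymap targets).mp hpre tar htar
  apply word_eq keymap dic tar.toList 0 hchar
  rcases hcase with h | h
  · left
    obtain ⟨c, hc, hnone⟩ := h
    exact ⟨c, hc, (altBest_eq_none_iff keymap c).mpr hnone⟩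
  · right
    intro c hc
    rcases h c hc with h1 | h2
    · exact Or.inl ((altBest_eq_none_iff keymap c).mpr h1)
    · exact Or.inr (altBest_shallow keymap c h2)
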